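-- pv_equiv track=rewrite | github.com/progval/Supybot-plugins | ERepublik/local/lib.py | militaryPointsToLevel
-- ===== SOURCE A (Python) =====
-- def militaryPointsToLevel(points):
--     levels = [0, 40, 200, 1000, 4000, 10000, 20000, 40000, 80000, 160000, 320000, 640000, 1280000, 2560000]
--     idx = 0
--     level = -1
--     while(level == -1 and idx < len(levels)):
--         if(levels[idx] > points):
--             level = idx
--         idx += 1
--     return level
-- ===== SOURCE B (Python) =====
-- import bisect
--
-- def militaryPointsToLevel(points):
--     levels = [0, 40, 200, 1000, 4000, 10000, 20000, 40000, 80000, 160000, 320000, 640000, 1280000, 2560000]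
--     idx = bisect.bisect_right(levels, points)
--     return idx if idx < len(levels) else -1
-- ===== Notes on version B (the rewrite author's own statement) =====
-- stated objective: idiomatic
-- what changed: Replaced the left-to-right linear scan with sentinel state by a bisect_right binary search over the threshold list, mapping the no-threshold-exceeds case to -1.
import Mathlib
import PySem

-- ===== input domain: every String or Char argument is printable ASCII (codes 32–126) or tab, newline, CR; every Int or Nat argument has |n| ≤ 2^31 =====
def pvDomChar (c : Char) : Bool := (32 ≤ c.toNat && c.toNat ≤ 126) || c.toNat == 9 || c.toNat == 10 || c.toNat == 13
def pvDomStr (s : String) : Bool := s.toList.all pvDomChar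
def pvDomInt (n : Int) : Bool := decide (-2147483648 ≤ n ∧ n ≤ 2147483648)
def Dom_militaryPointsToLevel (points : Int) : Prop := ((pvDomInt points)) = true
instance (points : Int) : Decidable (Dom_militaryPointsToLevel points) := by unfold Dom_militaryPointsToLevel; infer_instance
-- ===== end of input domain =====

-- B replaces A's linear scan over the thresholds by a bisect_right binary search (idiomatic, same result).

-- ===== PORT A =====
-- A's while loop: `level` is the -1 sentinel; the remaining suffix of `levels` encodes idx < len(levels)
def pvLoopA (points : Int) : List Int → Int → Int → Int
  | [], _, level => level
  | l :: ls, idx, level =>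
      if level = -1 then
        if l > points then pvLoopA points ls (idx + 1) idx
        else pvLoopA points ls (idx + 1) level
      else level

def militaryPointsToLevel (points : Int) : Int :=
  pvLoopA points [0, 40, 200, 1000, 4000, 10000, 20000, 40000, 80000, 160000, 320000, 640000, 1280000, 2560000] 0 (-1)

-- ===== PORT B =====
-- bisect.bisect_right: lo=0, hi=len(a); while lo<hi: mid=(lo+hi)//2; if x < a[mid]: hi=mid else lo=mid+1; return lo
-- (indices are nonnegative throughout, so Nat arithmetic is exact; fuel 14 ≥ the loop's trip count)
def pvBisectR (levels : List Int) (x : Int) : Nat → Nat → Nat → Nat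
  | 0, lo, _ => lo
  | f + 1, lo, hi =>
      if lo < hi then
        let mid := (lo + hi) / 2
        if x < levels.getD mid 0 then pvBisectR levels x f lo mid
        else pvBisectR levels x f (mid + 1) hi
      else lo

def militaryPointsToLevel_alt (points : Int) : Int :=
  let levels : List Int := [0, 40, 200, 1000, 4000, 10000, 20000, 40000, 80000, 160000, 320000, 640000, 1280000, 2560000]
  let idx := pvBisectR levels points 14 0 14
  if idx < 14 then (idx : Int) else -1

-- ===== PRECONDITION & SPEC =====
def Spec_militaryPointsToLevel (points : Int) (out : Int) : Prop := out = militaryPointsToLevel_alt points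
instance (points : Int) (out : Int) : Decidable (Spec_militaryPointsToLevel points out) := by unfold Spec_militaryPointsToLevel; infer_instance

-- ===== CLAIM (what is proved, stated in full; the proofs are below) =====
def Claim_equal_militaryPointsToLevel : Prop := ∀ (points : Int), Dom_militaryPointsToLevel points → Spec_militaryPointsToLevel points (militaryPointsToLevel points)

-- ===== LEMMAS AND PROOFS =====
-- the common closed form both ports are reduced to
def pvCF (p : Int) : Int :=
  if p < 0 then 0 else
  if p < 40 then 1 else
  if p < 200 then 2 else
  if p < 1000 then 3 else
  if p < 4000 then 4 else
  if p < 10000 then 5 else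
  if p < 20000 then 6 else
  if p < 40000 then 7 else
  if p < 80000 then 8 else
  if p < 160000 then 9 else
  if p < 320000 then 10 else
  if p < 640000 then 11 else
  if p < 1280000 then 12 else
  if p < 2560000 then 13 else
  -1

lemma pvA_eval (p : Int) : militaryPointsToLevel p = pvCF p := by
  simp only [militaryPointsToLevel]
  simp [pvLoopA, pvCF]

lemma pvB_eval_0 (p : Int) (h0 : p < 0) : militaryPointsToLevel_alt p = pvCF p := by
  have hb : pvBisectR [0, 40, 200, 1000, 4000, 10000, 20000, 40000, 80000, 160000, 320000, 640000, 1280000, 2560000] p 14 0 14 = 0 := by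
    rw [pvBisectR]; norm_num
    rw [if_pos (by omega)]
    rw [pvBisectR]; norm_num
    rw [if_pos (by omega)]
    rw [pvBisectR]; norm_num
    rw [if_pos (by omega)]
    rw [pvBisectR]; norm_num
    rw [if_pos (by omega)]
    rw [pvBisectR]; norm_num
  have hv : militaryPointsToLevel_alt p = (0 : Int) := by
    simp only [militaryPointsToLevel_alt, hb]; norm_num
  rw [hv]; clear hv hb
  simp only [pvCF]
  rw [if_pos (by omega)]

lemma pvB_eval_1 (p : Int) (h0 : 0 ≤ p ∧ p < 40) : militaryPointsToLevel_alt p = pvCF p := by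
  have hb : pvBisectR [0, 40, 200, 1000, 4000, 10000, 20000, 40000, 80000, 160000, 320000, 640000, 1280000, 2560000] p 14 0 14 = 1 := by
    rw [pvBisectR]; norm_num
    rw [if_pos (by omega)]
    rw [pvBisectR]; norm_num
    rw [if_pos (by omega)]
    rw [pvBisectR]; norm_num
    rw [if_pos (by omega)]
    rw [pvBisectR]; norm_num
    rw [if_neg (by omega)]
    rw [pvBisectR]; norm_num
  have hv : militaryPointsToLevel_alt p = (1 : Int) := by
    simp only [militaryPointsToLevel_alt, hb]; norm_num
  rw [hv]; clear hv hb
  simp only [pvCF]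
  rw [if_neg (by omega)]
  rw [if_pos (by omega)]

lemma pvB_eval_2 (p : Int) (h0 : 40 ≤ p ∧ p < 200) : militaryPointsToLevel_alt p = pvCF p := by
  have hb : pvBisectR [0, 40, 200, 1000, 4000, 10000, 20000, 40000, 80000, 160000, 320000, 640000, 1280000, 2560000] p 14 0 14 = 2 := by
    rw [pvBisectR]; norm_num
    rw [if_pos (by omega)]
    rw [pvBisectR]; norm_num
    rw [if_pos (by omega)]
    rw [pvBisectR]; norm_num
    rw [if_neg (by omega)]
    rw [pvBisectR]; norm_num
    rw [if_pos (by omega)]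
    rw [pvBisectR]; norm_num
  have hv : militaryPointsToLevel_alt p = (2 : Int) := by
    simp only [militaryPointsToLevel_alt, hb]; norm_num
  rw [hv]; clear hv hb
  simp only [pvCF]
  rw [if_neg (by omega)]
  rw [if_neg (by omega)]
  rw [if_pos (by omega)]

lemma pvB_eval_3 (p : Int) (h0 : 200 ≤ p ∧ p < 1000) : militaryPointsToLevel_alt p = pvCF p := by
  have hb : pvBisectR [0, 40, 200, 1000, 4000, 10000, 20000, 40000, 80000, 160000, 320000, 640000, 1280000, 2560000] p 14 0 14 = 3 := by
    rw [pvBisectR]; norm_num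
    rw [if_pos (by omega)]
    rw [pvBisectR]; norm_num
    rw [if_pos (by omega)]
    rw [pvBisectR]; norm_num
    rw [if_neg (by omega)]
    rw [pvBisectR]; norm_num
    rw [if_neg (by omega)]
    rw [pvBisectR]; norm_num
  have hv : militaryPointsToLevel_alt p = (3 : Int) := by
    simp only [militaryPointsToLevel_alt, hb]; norm_num
  rw [hv]; clear hv hb
  simp only [pvCF]
  rw [if_neg (by omega)]
  rw [if_neg (by omega)]
  rw [if_neg (by omega)]
  rw [if_pos (by omega)]

lemma pvB_eval_4 (p : Int) (h0 : 1000 ≤ p ∧ p < 4000) : militaryPointsToLevel_alt p = pvCF p := by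
  have hb : pvBisectR [0, 40, 200, 1000, 4000, 10000, 20000, 40000, 80000, 160000, 320000, 640000, 1280000, 2560000] p 14 0 14 = 4 := by
    rw [pvBisectR]; norm_num
    rw [if_pos (by omega)]
    rw [pvBisectR]; norm_num
    rw [if_neg (by omega)]
    rw [pvBisectR]; norm_num
    rw [if_pos (by omega)]
    rw [pvBisectR]; norm_num
    rw [if_pos (by omega)]
    rw [pvBisectR]; norm_num
  have hv : militaryPointsToLevel_alt p = (4 : Int) := by
    simp only [militaryPointsToLevel_alt, hb]; norm_num
  rw [hv]; clear hv hb
  simp only [pvCF]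
  rw [if_neg (by omega)]
  rw [if_neg (by omega)]
  rw [if_neg (by omega)]
  rw [if_neg (by omega)]
  rw [if_pos (by omega)]

lemma pvB_eval_5 (p : Int) (h0 : 4000 ≤ p ∧ p < 10000) : militaryPointsToLevel_alt p = pvCF p := by
  have hb : pvBisectR [0, 40, 200, 1000, 4000, 10000, 20000, 40000, 80000, 160000, 320000, 640000, 1280000, 2560000] p 14 0 14 = 5 := by
    rw [pvBisectR]; norm_num
    rw [if_pos (by omega)]
    rw [pvBisectR]; norm_num
    rw [if_neg (by omega)]
    rw [pvBisectR]; norm_num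
    rw [if_pos (by omega)]
    rw [pvBisectR]; norm_num
    rw [if_neg (by omega)]
    rw [pvBisectR]; norm_num
  have hv : militaryPointsToLevel_alt p = (5 : Int) := by
    simp only [militaryPointsToLevel_alt, hb]; norm_num
  rw [hv]; clear hv hb
  simp only [pvCF]
  rw [if_neg (by omega)]
  rw [if_neg (by omega)]
  rw [if_neg (by omega)]
  rw [if_neg (by omega)]
  rw [if_neg (by omega)]
  rw [if_pos (by omega)]

lemma pvB_eval_6 (p : Int) (h0 : 10000 ≤ p ∧ p < 20000) : militaryPointsToLevel_alt p = pvCF p := by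
  have hb : pvBisectR [0, 40, 200, 1000, 4000, 10000, 20000, 40000, 80000, 160000, 320000, 640000, 1280000, 2560000] p 14 0 14 = 6 := by
    rw [pvBisectR]; norm_num
    rw [if_pos (by omega)]
    rw [pvBisectR]; norm_num
    rw [if_neg (by omega)]
    rw [pvBisectR]; norm_num
    rw [if_neg (by omega)]
    rw [pvBisectR]; norm_num
    rw [if_pos (by omega)]
    rw [pvBisectR]; norm_num
  have hv : militaryPointsToLevel_alt p = (6 : Int) := by
    simp only [militaryPointsToLevel_alt, hb]; norm_num
  rw [hv]; clear hv hb
  simp only [pvCF]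
  rw [if_neg (by omega)]
  rw [if_neg (by omega)]
  rw [if_neg (by omega)]
  rw [if_neg (by omega)]
  rw [if_neg (by omega)]
  rw [if_neg (by omega)]
  rw [if_pos (by omega)]

lemma pvB_eval_7 (p : Int) (h0 : 20000 ≤ p ∧ p < 40000) : militaryPointsToLevel_alt p = pvCF p := by
  have hb : pvBisectR [0, 40, 200, 1000, 4000, 10000, 20000, 40000, 80000, 160000, 320000, 640000, 1280000, 2560000] p 14 0 14 = 7 := by
    rw [pvBisectR]; norm_num
    rw [if_pos (by omega)]
    rw [pvBisectR]; norm_num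
    rw [if_neg (by omega)]
    rw [pvBisectR]; norm_num
    rw [if_neg (by omega)]
    rw [pvBisectR]; norm_num
    rw [if_neg (by omega)]
    rw [pvBisectR]; norm_num
  have hv : militaryPointsToLevel_alt p = (7 : Int) := by
    simp only [militaryPointsToLevel_alt, hb]; norm_num
  rw [hv]; clear hv hb
  simp only [pvCF]
  rw [if_neg (by omega)]
  rw [if_neg (by omega)]
  rw [if_neg (by omega)]
  rw [if_neg (by omega)]
  rw [if_neg (by omega)]
  rw [if_neg (by omega)]
  rw [if_neg (by omega)]
  rw [if_pos (by omega)]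

lemma pvB_eval_8 (p : Int) (h0 : 40000 ≤ p ∧ p < 80000) : militaryPointsToLevel_alt p = pvCF p := by
  have hb : pvBisectR [0, 40, 200, 1000, 4000, 10000, 20000, 40000, 80000, 160000, 320000, 640000, 1280000, 2560000] p 14 0 14 = 8 := by
    rw [pvBisectR]; norm_num
    rw [if_neg (by omega)]
    rw [pvBisectR]; norm_num
    rw [if_pos (by omega)]
    rw [pvBisectR]; norm_num
    rw [if_pos (by omega)]
    rw [pvBisectR]; norm_num
    rw [if_pos (by omega)]
    rw [pvBisectR]; norm_num
  have hv : militaryPointsToLevel_alt p = (8 : Int) := by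
    simp only [militaryPointsToLevel_alt, hb]; norm_num
  rw [hv]; clear hv hb
  simp only [pvCF]
  rw [if_neg (by omega)]
  rw [if_neg (by omega)]
  rw [if_neg (by omega)]
  rw [if_neg (by omega)]
  rw [if_neg (by omega)]
  rw [if_neg (by omega)]
  rw [if_neg (by omega)]
  rw [if_neg (by omega)]
  rw [if_pos (by omega)]

lemma pvB_eval_9 (p : Int) (h0 : 80000 ≤ p ∧ p < 160000) : militaryPointsToLevel_alt p = pvCF p := by
  have hb : pvBisectR [0, 40, 200, 1000, 4000, 10000, 20000, 40000, 80000, 160000, 320000, 640000, 1280000, 2560000] p 14 0 14 = 9 := by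
    rw [pvBisectR]; norm_num
    rw [if_neg (by omega)]
    rw [pvBisectR]; norm_num
    rw [if_pos (by omega)]
    rw [pvBisectR]; norm_num
    rw [if_pos (by omega)]
    rw [pvBisectR]; norm_num
    rw [if_neg (by omega)]
    rw [pvBisectR]; norm_num
  have hv : militaryPointsToLevel_alt p = (9 : Int) := by
    simp only [militaryPointsToLevel_alt, hb]; norm_num
  rw [hv]; clear hv hb
  simp only [pvCF]
  rw [if_neg (by omega)]
  rw [if_neg (by omega)]
  rw [if_neg (by omega)]
  rw [if_neg (by omega)]
  rw [if_neg (by omega)]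
  rw [if_neg (by omega)]
  rw [if_neg (by omega)]
  rw [if_neg (by omega)]
  rw [if_neg (by omega)]
  rw [if_pos (by omega)]

lemma pvB_eval_10 (p : Int) (h0 : 160000 ≤ p ∧ p < 320000) : militaryPointsToLevel_alt p = pvCF p := by
  have hb : pvBisectR [0, 40, 200, 1000, 4000, 10000, 20000, 40000, 80000, 160000, 320000, 640000, 1280000, 2560000] p 14 0 14 = 10 := by
    rw [pvBisectR]; norm_num
    rw [if_neg (by omega)]
    rw [pvBisectR]; norm_num
    rw [if_pos (by omega)]
    rw [pvBisectR]; norm_num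
    rw [if_neg (by omega)]
    rw [pvBisectR]; norm_num
    rw [if_pos (by omega)]
    rw [pvBisectR]; norm_num
  have hv : militaryPointsToLevel_alt p = (10 : Int) := by
    simp only [militaryPointsToLevel_alt, hb]; norm_num
  rw [hv]; clear hv hb
  simp only [pvCF]
  rw [if_neg (by omega)]
  rw [if_neg (by omega)]
  rw [if_neg (by omega)]
  rw [if_neg (by omega)]
  rw [if_neg (by omega)]
  rw [if_neg (by omega)]
  rw [if_neg (by omega)]
  rw [if_neg (by omega)]
  rw [if_neg (by omega)]
  rw [if_neg (by omega)]
  rw [if_pos (by omega)]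

lemma pvB_eval_11 (p : Int) (h0 : 320000 ≤ p ∧ p < 640000) : militaryPointsToLevel_alt p = pvCF p := by
  have hb : pvBisectR [0, 40, 200, 1000, 4000, 10000, 20000, 40000, 80000, 160000, 320000, 640000, 1280000, 2560000] p 14 0 14 = 11 := by
    rw [pvBisectR]; norm_num
    rw [if_neg (by omega)]
    rw [pvBisectR]; norm_num
    rw [if_pos (by omega)]
    rw [pvBisectR]; norm_num
    rw [if_neg (by omega)]
    rw [pvBisectR]; norm_num
    rw [if_neg (by omega)]
    rw [pvBisectR]; norm_num
  have hv : militaryPointsToLevel_alt p = (11 : Int) := by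
    simp only [militaryPointsToLevel_alt, hb]; norm_num
  rw [hv]; clear hv hb
  simp only [pvCF]
  rw [if_neg (by omega)]
  rw [if_neg (by omega)]
  rw [if_neg (by omega)]
  rw [if_neg (by omega)]
  rw [if_neg (by omega)]
  rw [if_neg (by omega)]
  rw [if_neg (by omega)]
  rw [if_neg (by omega)]
  rw [if_neg (by omega)]
  rw [if_neg (by omega)]
  rw [if_neg (by omega)]
  rw [if_pos (by omega)]

lemma pvB_eval_12 (p : Int) (h0 : 640000 ≤ p ∧ p < 1280000) : militaryPointsToLevel_alt p = pvCF p := by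
  have hb : pvBisectR [0, 40, 200, 1000, 4000, 10000, 20000, 40000, 80000, 160000, 320000, 640000, 1280000, 2560000] p 14 0 14 = 12 := by
    rw [pvBisectR]; norm_num
    rw [if_neg (by omega)]
    rw [pvBisectR]; norm_num
    rw [if_neg (by omega)]
    rw [pvBisectR]; norm_num
    rw [if_pos (by omega)]
    rw [pvBisectR]; norm_num
    rw [if_pos (by omega)]
    rw [pvBisectR]; norm_num
  have hv : militaryPointsToLevel_alt p = (12 : Int) := by
    simp only [militaryPointsToLevel_alt, hb]; norm_num
  rw [hv]; clear hv hb
  simp only [pvCF]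
  rw [if_neg (by omega)]
  rw [if_neg (by omega)]
  rw [if_neg (by omega)]
  rw [if_neg (by omega)]
  rw [if_neg (by omega)]
  rw [if_neg (by omega)]
  rw [if_neg (by omega)]
  rw [if_neg (by omega)]
  rw [if_neg (by omega)]
  rw [if_neg (by omega)]
  rw [if_neg (by omega)]
  rw [if_neg (by omega)]
  rw [if_pos (by omega)]

lemma pvB_eval_13 (p : Int) (h0 : 1280000 ≤ p ∧ p < 2560000) : militaryPointsToLevel_alt p = pvCF p := by
  have hb : pvBisectR [0, 40, 200, 1000, 4000, 10000, 20000, 40000, 80000, 160000, 320000, 640000, 1280000, 2560000] p 14 0 14 = 13 := by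
    rw [pvBisectR]; norm_num
    rw [if_neg (by omega)]
    rw [pvBisectR]; norm_num
    rw [if_neg (by omega)]
    rw [pvBisectR]; norm_num
    rw [if_pos (by omega)]
    rw [pvBisectR]; norm_num
    rw [if_neg (by omega)]
    rw [pvBisectR]; norm_num
  have hv : militaryPointsToLevel_alt p = (13 : Int) := by
    simp only [militaryPointsToLevel_alt, hb]; norm_num
  rw [hv]; clear hv hb
  simp only [pvCF]
  rw [if_neg (by omega)]
  rw [if_neg (by omega)]
  rw [if_neg (by omega)]
  rw [if_neg (by omega)]
  rw [if_neg (by omega)]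
  rw [if_neg (by omega)]
  rw [if_neg (by omega)]
  rw [if_neg (by omega)]
  rw [if_neg (by omega)]
  rw [if_neg (by omega)]
  rw [if_neg (by omega)]
  rw [if_neg (by omega)]
  rw [if_neg (by omega)]
  rw [if_pos (by omega)]

lemma pvB_eval_14 (p : Int) (h0 : 2560000 ≤ p) : militaryPointsToLevel_alt p = pvCF p := by
  have hb : pvBisectR [0, 40, 200, 1000, 4000, 10000, 20000, 40000, 80000, 160000, 320000, 640000, 1280000, 2560000] p 14 0 14 = 14 := by
    rw [pvBisectR]; norm_num
    rw [if_neg (by omega)]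
    rw [pvBisectR]; norm_num
    rw [if_neg (by omega)]
    rw [pvBisectR]; norm_num
    rw [if_neg (by omega)]
    rw [pvBisectR]; norm_num
  have hv : militaryPointsToLevel_alt p = (-1 : Int) := by
    simp only [militaryPointsToLevel_alt, hb]; norm_num
  rw [hv]; clear hv hb
  simp only [pvCF]
  rw [if_neg (by omega)]
  rw [if_neg (by omega)]
  rw [if_neg (by omega)]
  rw [if_neg (by omega)]
  rw [if_neg (by omega)]
  rw [if_neg (by omega)]
  rw [if_neg (by omega)]
  rw [if_neg (by omega)]
  rw [if_neg (by omega)]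
  rw [if_neg (by omega)]
  rw [if_neg (by omega)]
  rw [if_neg (by omega)]
  rw [if_neg (by omega)]
  rw [if_neg (by omega)]

lemma pvB_eval (p : Int) : militaryPointsToLevel_alt p = pvCF p := by
  rcases lt_or_ge p 0 with h | h0
  · exact pvB_eval_0 p h
  rcases lt_or_ge p 40 with h | h1
  · exact pvB_eval_1 p ⟨h0, h⟩
  rcases lt_or_ge p 200 with h | h2
  · exact pvB_eval_2 p ⟨h1, h⟩
  rcases lt_or_ge p 1000 with h | h3
  · exact pvB_eval_3 p ⟨h2, h⟩
  rcases lt_or_ge p 4000 with h | h4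
  · exact pvB_eval_4 p ⟨h3, h⟩
  rcases lt_or_ge p 10000 with h | h5
  · exact pvB_eval_5 p ⟨h4, h⟩
  rcases lt_or_ge p 20000 with h | h6
  · exact pvB_eval_6 p ⟨h5, h⟩
  rcases lt_or_ge p 40000 with h | h7
  · exact pvB_eval_7 p ⟨h6, h⟩
  rcases lt_or_ge p 80000 with h | h8
  · exact pvB_eval_8 p ⟨h7, h⟩
  rcases lt_or_ge p 160000 with h | h9
  · exact pvB_eval_9 p ⟨h8, h⟩
  rcases lt_or_ge p 320000 with h | h10
  · exact pvB_eval_10 p ⟨h9, h⟩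
  rcases lt_or_ge p 640000 with h | h11
  · exact pvB_eval_11 p ⟨h10, h⟩
  rcases lt_or_ge p 1280000 with h | h12
  · exact pvB_eval_12 p ⟨h11, h⟩
  rcases lt_or_ge p 2560000 with h | h13
  · exact pvB_eval_13 p ⟨h12, h⟩
  exact pvB_eval_14 p h13

-- ===== VERDICT (by name: the statement is the Claim_ definition above) =====
theorem militaryPointsToLevel_spec : Claim_equal_militaryPointsToLevel := by
  intro p _
  unfold Spec_militaryPointsToLevel
  rw [pvA_eval, pvB_eval]
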